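-- pv_equiv track=rewrite | github.com/bigabig/wikihow-qa | services/wikihow-bert/Datasets.py | create_nopeak_mask
-- ===== SOURCE A (Python) =====
-- def create_nopeak_mask(size):
--     nopeak_mask = []
--     for i in range(0, size):
--         temp = []
--         for j in range(0, size):
--             if j <= i:
--                 temp.append(1)
--             else:
--                 temp.append(0)
--         nopeak_mask.append(temp)
--
--     return nopeak_mask
-- ===== SOURCE B (Python) =====
-- def create_nopeak_mask(size):
--     # Incremental construction: each row is the previous row with one more 1
--     # carried forward, starting from an all-zero row.
--     nopeak_mask = []
--     row = [0] * size
--     for i in range(size):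
--         row = row.copy()
--         row[i] = 1
--         nopeak_mask.append(row)
--     return nopeak_mask
-- ===== Notes on version B (the rewrite author's own statement) =====
-- stated objective: alternative
-- what changed: Instead of recomputing each row with an inner j<=i comparison loop, B maintains a single running row carried across iterations: it starts from an all-zero row and derives row i from row i-1 by setting one position to 1.
import Mathlib
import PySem

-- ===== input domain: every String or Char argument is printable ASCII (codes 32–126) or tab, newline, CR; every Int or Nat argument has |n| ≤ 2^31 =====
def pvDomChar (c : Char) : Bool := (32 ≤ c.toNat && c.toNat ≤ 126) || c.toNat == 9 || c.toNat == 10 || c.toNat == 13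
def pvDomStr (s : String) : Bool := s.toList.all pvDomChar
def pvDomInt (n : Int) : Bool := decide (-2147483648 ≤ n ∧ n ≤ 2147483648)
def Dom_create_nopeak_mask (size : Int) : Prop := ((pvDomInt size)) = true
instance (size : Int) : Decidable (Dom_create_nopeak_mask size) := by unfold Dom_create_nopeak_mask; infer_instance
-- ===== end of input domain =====

-- B maintains one running row carried across iterations (row i = row i-1 with one more 1)
-- instead of A's inner j-loop that re-tests j ≤ i per element; objective: alternative.

-- ===== PORT A =====
def create_nopeak_mask (size : Int) : List (List Int) :=
  (PySem.List.pyRange 0 size 1).foldl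
    (fun acc i =>
      acc ++ [(PySem.List.pyRange 0 size 1).foldl
        (fun temp j => temp ++ [if j ≤ i then (1 : Int) else 0]) []])
    []

-- ===== PORT B =====
-- B's loop state is the pair (nopeak_mask, row); row[i] = 1 on a fresh copy is List.set
-- (exact here: i is a nonnegative in-range index from range(size)).
def create_nopeak_mask_alt (size : Int) : List (List Int) :=
  ((PySem.List.pyRange 0 size 1).foldl
    (fun (st : List (List Int) × List Int) i =>
      let row := st.2.set i.toNat 1
      (st.1 ++ [row], row))
    ([], List.replicate size.toNat (0 : Int))).1

-- ===== PRECONDITION & SPEC =====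
def Spec_create_nopeak_mask (size : Int) (out : List (List Int)) : Prop := out = create_nopeak_mask_alt size
instance (size : Int) (out : List (List Int)) : Decidable (Spec_create_nopeak_mask size out) := by unfold Spec_create_nopeak_mask; infer_instance

-- ===== CLAIM (what is proved, stated in full; the proofs are below) =====
def Claim_equal_create_nopeak_mask : Prop := ∀ (size : Int), Dom_create_nopeak_mask size → Spec_create_nopeak_mask size (create_nopeak_mask size)

-- ===== LEMMAS AND PROOFS =====

-- the closed form of row i of the triangular mask
def pvRow (size i : Int) : List Int :=
  List.replicate (i + 1).toNat (1 : Int) ++ List.replicate (size - i - 1).toNat (0 : Int)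

-- A's inner j-loop produces exactly pvRow, for 0 ≤ i < size
theorem a_row_eq (size i : Int) (h0 : 0 ≤ i) (h1 : i < size) :
    (PySem.List.pyRange 0 size 1).foldl
      (fun temp j => temp ++ [if j ≤ i then (1 : Int) else 0]) []
    = pvRow size i := by
  rw [PySem.List.foldl_append_eq_flatMap]
  rw [PySem.List.pyRange_one_append 0 (i + 1) size (by omega) (by omega)]
  rw [List.flatMap_append, List.nil_append]
  unfold pvRow
  have h2 : ((PySem.List.pyRange 0 (i + 1) 1).flatMap fun j => [if j ≤ i then (1 : Int) else 0])
      = List.replicate (i + 1).toNat (1 : Int) := by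
    rw [List.flatMap_def]
    have : ∀ j ∈ PySem.List.pyRange 0 (i + 1) 1,
        [if j ≤ i then (1 : Int) else 0] = [(1 : Int)] := by
      intro j hj
      rw [PySem.List.mem_pyRange_one] at hj
      simp [show j ≤ i by omega]
    rw [List.map_congr_left this]
    simp [List.map_const', PySem.List.length_pyRange_one]
  have h3 : ((PySem.List.pyRange (i + 1) size 1).flatMap fun j => [if j ≤ i then (1 : Int) else 0])
      = List.replicate (size - i - 1).toNat (0 : Int) := by
    rw [List.flatMap_def]
    have : ∀ j ∈ PySem.List.pyRange (i + 1) size 1,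
        [if j ≤ i then (1 : Int) else 0] = [(0 : Int)] := by
      intro j hj
      rw [PySem.List.mem_pyRange_one] at hj
      simp [show ¬ j ≤ i by omega]
    rw [List.map_congr_left this]
    simp [List.map_const', PySem.List.length_pyRange_one]
    omega
  rw [h2, h3]

-- setting position k on the running row carries the triangle one step forward
theorem row_step (size k : Int) (h0 : 0 ≤ k) (h1 : k < size) :
    (List.replicate k.toNat (1 : Int) ++ List.replicate (size - k).toNat (0 : Int)).set k.toNat 1
    = pvRow size k := by
  unfold pvRow
  rw [List.set_append]
  have hlen : (List.replicate k.toNat (1 : Int)).length = k.toNat := List.length_replicate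
  rw [if_neg (by omega)]
  have hz : (size - k).toNat = ((size - k - 1).toNat) + 1 := by omega
  rw [hlen, Nat.sub_self, hz, List.replicate_succ, List.set_cons_zero]
  have : (k + 1).toNat = k.toNat + 1 := by omega
  rw [this, List.replicate_succ' , List.append_assoc]
  simp

-- B's fold invariant: starting from the running row for step k, the fold over
-- pyRange k size 1 appends exactly the closed-form rows k, k+1, …, size-1
theorem b_inv (size : Int) : ∀ (n : ℕ) (k : Int) (acc : List (List Int)),
    0 ≤ k → k ≤ size → n = (size - k).toNat →
    ((PySem.List.pyRange k size 1).foldl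
      (fun (st : List (List Int) × List Int) i =>
        (st.1 ++ [st.2.set i.toNat 1], st.2.set i.toNat 1))
      (acc, List.replicate k.toNat (1 : Int) ++ List.replicate (size - k).toNat (0 : Int))).1
    = acc ++ (PySem.List.pyRange k size 1).map (pvRow size) := by
  intro n
  induction n with
  | zero =>
    intro k acc h0 h1 hn
    have hks : k = size := by omega
    rw [PySem.List.pyRange_one_eq_nil (by omega)]
    simp
  | succ m ih =>
    intro k acc h0 h1 hn
    have hlt : k < size := by omega
    rw [PySem.List.pyRange_one_cons hlt]
    simp only [List.foldl_cons, List.map_cons]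
    rw [row_step size k h0 hlt]
    have hrow : pvRow size k
        = List.replicate (k + 1).toNat (1 : Int) ++ List.replicate (size - (k + 1)).toNat (0 : Int) := by
      unfold pvRow; congr 1; congr 1; omega
    rw [hrow]
    rw [ih (k + 1)
      (acc ++ [List.replicate (k + 1).toNat (1 : Int) ++ List.replicate (size - (k + 1)).toNat (0 : Int)])
      (by omega) (by omega) (by omega)]
    simp

-- ===== VERDICT (by name: the statement is the Claim_ definition above) =====
theorem create_nopeak_mask_spec : Claim_equal_create_nopeak_mask := by
  intro size _
  unfold Spec_create_nopeak_mask create_nopeak_mask create_nopeak_mask_alt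
  by_cases hs : 0 < size
  · have hA : (PySem.List.pyRange 0 size 1).foldl
        (fun acc i =>
          acc ++ [(PySem.List.pyRange 0 size 1).foldl
            (fun temp j => temp ++ [if j ≤ i then (1 : Int) else 0]) []]) []
        = (PySem.List.pyRange 0 size 1).map (pvRow size) := by
      rw [PySem.List.foldl_append_eq_flatMap, List.nil_append, List.flatMap_def]
      have : ∀ i ∈ PySem.List.pyRange 0 size 1,
          [(PySem.List.pyRange 0 size 1).foldl
            (fun temp j => temp ++ [if j ≤ i then (1 : Int) else 0]) []]
          = [pvRow size i] := by
        intro i hi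
        rw [PySem.List.mem_pyRange_one] at hi
        rw [a_row_eq size i hi.1 hi.2]
      rw [List.map_congr_left this]
      induction (PySem.List.pyRange 0 size 1) with
      | nil => simp
      | cons a l ihl => simp_all
    have hB := b_inv size (size - 0).toNat 0 [] le_rfl (by omega) rfl
    simp only [Int.toNat_zero, List.replicate_zero, List.nil_append, Int.sub_zero] at hB
    rw [hA, hB]
  · rw [PySem.List.pyRange_one_eq_nil (by omega)]
    simp
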